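-- pv_equiv track=rewrite | github.com/Fmancino/advent-of-code-2020 | 18/main.py | add_parens
-- ===== SOURCE A (Python) =====
-- def add_parens(text):
--     _open = 1
--     for idx, l in enumerate(text):
--         if l == '(':
--             _open += 1
--         elif l == ')':
--             _open -= 1
--             if _open == 0:
--                 return '(' + text[:idx] + ')' + text[idx:]
--     return '(' + text + ')'
-- ===== SOURCE B (Python) =====
-- def add_parens(text):
--     deltas = [(c == '(') - (c == ')') for c in text]
--     depths = []
--     d = 1
--     for x in deltas:
--         d += x
--         depths.append(d)
--     if 0 in depths:
--         idx = depths.index(0)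
--         return '(' + text[:idx] + ')' + text[idx:]
--     return '(' + text + ')'
-- ===== Notes on version B (the rewrite author's own statement) =====
-- stated objective: alternative
-- what changed: Replaces the early-returning scan that tracks a single open-counter with a two-pass table: map each char to a +1/-1/0 delta, build the full prefix-depth list, then search it for the first 0 with list.index.
import Mathlib
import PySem

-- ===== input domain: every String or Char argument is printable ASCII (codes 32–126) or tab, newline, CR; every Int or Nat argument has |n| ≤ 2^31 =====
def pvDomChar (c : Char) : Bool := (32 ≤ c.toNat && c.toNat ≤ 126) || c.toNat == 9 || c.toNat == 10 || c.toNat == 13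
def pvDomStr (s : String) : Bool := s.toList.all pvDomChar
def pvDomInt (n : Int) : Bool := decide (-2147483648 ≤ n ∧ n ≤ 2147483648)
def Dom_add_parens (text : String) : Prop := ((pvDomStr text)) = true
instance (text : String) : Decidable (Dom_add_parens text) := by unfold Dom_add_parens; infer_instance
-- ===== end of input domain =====

-- B replaces A's early-returning open-counter scan with a prefix-depth table searched for its first 0 (alternative decomposition, same cost).


-- ===== PORT A =====
-- the for-loop with its early return; idx/_open as in the Python, slices as take/drop (idx ≥ 0)
def addParensLoop (text : String) : List Char → Nat → Int → String
  | [], _, _ => "(" ++ text ++ ")"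
  | l :: rest, idx, opn =>
    if l = '(' then addParensLoop text rest (idx + 1) (opn + 1)
    else if l = ')' then
      if opn - 1 = 0 then
        "(" ++ String.ofList (text.toList.take idx) ++ ")" ++ String.ofList (text.toList.drop idx)
      else addParensLoop text rest (idx + 1) (opn - 1)
    else addParensLoop text rest (idx + 1) opn

def add_parens (text : String) : String := addParensLoop text text.toList 0 1

-- ===== PORT B =====
-- (c == '(') - (c == ')')
def pvDelta (c : Char) : Int := (if c = '(' then 1 else 0) - (if c = ')' then 1 else 0)

-- the depth-building loop: running value d and the appended list
def pvDepths (deltas : List Int) : Int × List Int :=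
  deltas.foldl (fun s x => (s.1 + x, s.2 ++ [s.1 + x])) (1, [])

def add_parens_alt (text : String) : String :=
  let deltas := text.toList.map pvDelta
  let depths := (pvDepths deltas).2
  match PySem.List.index? depths 0 with
  | some idx => "(" ++ String.ofList (text.toList.take idx) ++ ")" ++ String.ofList (text.toList.drop idx)
  | none => "(" ++ text ++ ")"

-- ===== PRECONDITION & SPEC =====
def Spec_add_parens (text : String) (out : String) : Prop := out = add_parens_alt text
instance (text : String) (out : String) : Decidable (Spec_add_parens text out) := by unfold Spec_add_parens; infer_instance

-- ===== CLAIM (what is proved, stated in full; the proofs are below) =====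
def Claim_equal_add_parens : Prop := ∀ (text : String), Dom_add_parens text → Spec_add_parens text (add_parens text)

-- ===== LEMMAS AND PROOFS =====

-- the running-depth list starting from d
def pvScan (d : Int) : List Int → List Int
  | [] => []
  | x :: xs => (d + x) :: pvScan (d + x) xs

theorem pvDepths_eq_scan (d : Int) (acc : List Int) (xs : List Int) :
    (xs.foldl (fun s x => (s.1 + x, s.2 ++ [s.1 + x])) (d, acc)).2 = acc ++ pvScan d xs := by
  induction xs generalizing d acc with
  | nil => simp [pvScan]
  | cons x xs ih => simp [List.foldl, pvScan, ih]

theorem addParensLoop_eq (text : String) (cs : List Char) (idx : Nat) (opn : Int)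
    (hopn : 1 ≤ opn) :
    addParensLoop text cs idx opn =
      match PySem.List.index? (pvScan opn (cs.map pvDelta)) 0 with
      | some j => "(" ++ String.ofList (text.toList.take (idx + j)) ++ ")" ++
                  String.ofList (text.toList.drop (idx + j))
      | none => "(" ++ text ++ ")" := by
  induction cs generalizing idx opn with
  | nil => simp [addParensLoop, pvScan, PySem.List.index?]
  | cons c rest ih =>
    by_cases hc1 : c = '('
    · have hne : opn + pvDelta c ≠ 0 := by simp [pvDelta, hc1]; omega
      rw [addParensLoop, if_pos hc1]
      simp only [List.map, pvScan]
      rw [PySem.List.index?_cons_of_ne _ hne]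
      rw [ih (idx + 1) (opn + 1) (by omega)]
      have hd : pvDelta c = 1 := by simp [pvDelta, hc1]
      rw [hd]
      cases h : PySem.List.index? (pvScan (opn + 1) (rest.map pvDelta)) 0 with
      | none => simp
      | some j => simp [Nat.add_assoc, Nat.add_comm 1 j]
    · by_cases hc2 : c = ')'
      · have hd : pvDelta c = -1 := by simp [pvDelta, hc2]
        by_cases hz : opn - 1 = 0
        · rw [addParensLoop, if_neg hc1, if_pos hc2, if_pos hz]
          have : opn + pvDelta c = 0 := by rw [hd]; omega
          simp only [List.map, pvScan, this]
          rw [PySem.List.index?_cons_self]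
          simp
        · rw [addParensLoop, if_neg hc1, if_pos hc2, if_neg hz]
          have hne : opn + pvDelta c ≠ 0 := by rw [hd]; omega
          simp only [List.map, pvScan]
          rw [PySem.List.index?_cons_of_ne _ hne]
          rw [ih (idx + 1) (opn - 1) (by omega)]
          have : opn + pvDelta c = opn - 1 := by rw [hd]; ring
          rw [this]
          cases h : PySem.List.index? (pvScan (opn - 1) (rest.map pvDelta)) 0 with
          | none => simp
          | some j => simp [Nat.add_assoc, Nat.add_comm 1 j]
      · have hd : pvDelta c = 0 := by simp [pvDelta, hc1, hc2]
        have hne : opn + pvDelta c ≠ 0 := by rw [hd]; omega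
        rw [addParensLoop, if_neg hc1, if_neg hc2]
        simp only [List.map, pvScan]
        rw [PySem.List.index?_cons_of_ne _ hne]
        rw [ih (idx + 1) opn hopn]
        rw [hd, add_zero]
        cases h : PySem.List.index? (pvScan opn (rest.map pvDelta)) 0 with
        | none => simp
        | some j => simp [Nat.add_assoc, Nat.add_comm 1 j]

-- ===== VERDICT (by name: the statement is the Claim_ definition above) =====
theorem add_parens_spec : Claim_equal_add_parens := by
  intro text _
  unfold Spec_add_parens add_parens add_parens_alt pvDepths
  simp only [pvDepths_eq_scan, List.nil_append]
  rw [addParensLoop_eq text _ 0 1 (by norm_num)]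
  cases PySem.List.index? (pvScan 1 (text.toList.map pvDelta)) 0 <;> simp
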